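-- pv_equiv track=rewrite | github.com/pacoman-258/rag_papers_by_AI | backend/live2d_service.py | _pick_default_expression
-- ===== SOURCE A (Python) =====
-- def _pick_default_expression(expressions: list[str]) -> str | None:
--     if not expressions:
--         return None
--
--     preferred_keywords = ("think", "exp1", "shy", "note", "abb")
--     for keyword in preferred_keywords:
--         for expression in expressions:
--             if keyword in expression.casefold():
--                 return expression
--     return expressions[0]
-- ===== SOURCE B (Python) =====
-- def _pick_default_expression(expressions: list[str]) -> str | None:
--     if not expressions:
--         return None
--
--     preferred_keywords = ("think", "exp1", "shy", "note", "abb")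
--     sentinel = len(preferred_keywords)
--     best_priority = sentinel
--     best_expr = None
--     for expression in expressions:
--         folded = expression.casefold()
--         priority = next(
--             (i for i, kw in enumerate(preferred_keywords) if kw in folded),
--             sentinel,
--         )
--         if priority < best_priority:
--             best_priority = priority
--             best_expr = expression
--     return best_expr if best_priority < sentinel else expressions[0]
-- ===== Notes on version B (the rewrite author's own statement) =====
-- stated objective: alternative
-- what changed: Replaced the keyword-outer nested loops (restarting the expression scan for every keyword) by a single pass over expressions that tracks the minimum keyword-index priority and its earliest attainer.
import Mathlib
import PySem

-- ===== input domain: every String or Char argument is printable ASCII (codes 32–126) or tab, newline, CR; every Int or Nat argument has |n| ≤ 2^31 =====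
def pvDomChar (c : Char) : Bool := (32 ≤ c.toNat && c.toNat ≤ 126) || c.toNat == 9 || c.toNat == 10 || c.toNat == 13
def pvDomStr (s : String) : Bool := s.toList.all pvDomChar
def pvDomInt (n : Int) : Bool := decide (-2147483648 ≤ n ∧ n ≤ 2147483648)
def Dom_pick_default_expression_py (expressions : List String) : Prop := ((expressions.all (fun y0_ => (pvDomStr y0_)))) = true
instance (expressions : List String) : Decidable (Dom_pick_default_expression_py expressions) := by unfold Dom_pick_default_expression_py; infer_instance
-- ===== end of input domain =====

-- B replaces A's keyword-outer nested loops by a single pass over expressions tracking the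
-- minimum keyword-index priority and its earliest attainer (objective: alternative, same cost).
-- str.casefold() is ported as PySem.Str.lower: exact on the ASCII domain Dom_ admits.

-- ===== PORT A =====
-- 'keyword in expression.casefold()'
def pvMatch (kw e : String) : Bool := PySem.Str.isIn kw (PySem.Str.lower e)

-- A's nested loops with early return: outer over keywords, inner scan = first matching expression.
def pvLoopA (kws : List String) (es : List String) : Option String :=
  match kws with
  | [] => none
  | kw :: rest =>
    match es.find? (fun e => pvMatch kw e) with
    | some e => some e
    | none => pvLoopA rest es

def pick_default_expression_py (expressions : List String) : Option String :=
  if expressions = [] then none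
  else
    match pvLoopA ["think", "exp1", "shy", "note", "abb"] expressions with
    | some e => some e
    | none => PySem.List.pyGet? expressions 0

-- ===== PORT B =====
-- priority = first index i with kws[i] matching e, else kws.length (the sentinel)
def pvPrio (kws : List String) (e : String) : Nat :=
  match kws with
  | [] => 0
  | kw :: rest => if pvMatch kw e then 0 else pvPrio rest e + 1

def pvStep (kws : List String) (acc : Nat × Option String) (e : String) : Nat × Option String :=
  let q := pvPrio kws e
  if q < acc.1 then (q, some e) else acc

def pick_default_expression_py_alt (expressions : List String) : Option String :=
  if expressions = [] then none
  else
    let kws := ["think", "exp1", "shy", "note", "abb"]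
    let st := expressions.foldl (pvStep kws) (kws.length, none)
    if st.1 < kws.length then st.2 else PySem.List.pyGet? expressions 0

-- ===== PRECONDITION & SPEC =====
def Spec_pick_default_expression_py (expressions : List String) (out : Option String) : Prop := out = pick_default_expression_py_alt expressions
instance (expressions : List String) (out : Option String) : Decidable (Spec_pick_default_expression_py expressions out) := by unfold Spec_pick_default_expression_py; infer_instance

-- ===== CLAIM (what is proved, stated in full; the proofs are below) =====
def Claim_equal_pick_default_expression_py : Prop := ∀ (expressions : List String), Dom_pick_default_expression_py expressions → Spec_pick_default_expression_py expressions (pick_default_expression_py expressions)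

-- ===== LEMMAS AND PROOFS =====

-- once the accumulated priority is 0 the fold is constant
theorem pvFold_fixed_zero (kws : List String) (o : Option String) (es : List String) :
    es.foldl (pvStep kws) (0, o) = (0, o) := by
  induction es with
  | nil => rfl
  | cons e es ih => simp [List.foldl_cons, pvStep, ih]

theorem pvLoopA_mem (kws es : List String) (e : String) (h : pvLoopA kws es = some e) :
    e ∈ es := by
  induction kws with
  | nil => simp [pvLoopA] at h
  | cons kw rest ih =>
    simp only [pvLoopA] at h
    cases hf : es.find? (fun x => pvMatch kw x) with
    | some e' =>
      rw [hf] at h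
      cases h
      exact List.mem_of_find?_eq_some hf
    | none => rw [hf] at h; exact ih h

theorem pvLoopA_prio_lt (kws es : List String) (e : String) (h : pvLoopA kws es = some e) :
    pvPrio kws e < kws.length := by
  induction kws with
  | nil => simp [pvLoopA] at h
  | cons kw rest ih =>
    simp only [pvLoopA] at h
    cases hf : es.find? (fun x => pvMatch kw x) with
    | some e' =>
      rw [hf] at h
      cases h
      have hm : pvMatch kw e = true := by
        have := List.find?_some hf; simpa using this
      simp [pvPrio, hm]
    | none =>
      rw [hf] at h
      have hm : pvMatch kw e = false := by
        have := List.find?_eq_none.mp hf e (pvLoopA_mem rest es e h)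
        simpa using this
      simp only [pvPrio, hm, Bool.false_eq_true, if_false, List.length_cons]
      exact Nat.succ_lt_succ (ih h)

-- first f-match wins: if some element matches the head keyword, the fold lands on the first one
theorem pvFold_head_match (kw : String) (rest : List String) (e0 : String) :
    ∀ (es : List String) (b : Nat) (o : Option String), 0 < b →
    es.find? (fun e => pvMatch kw e) = some e0 →
    es.foldl (pvStep (kw :: rest)) (b, o) = (0, some e0) := by
  intro es
  induction es with
  | nil => intro b o _ h; simp at h
  | cons e es ih =>
    intro b o hb hf
    rw [List.find?_cons] at hf
    by_cases hm : pvMatch kw e = true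
    · rw [hm] at hf; simp at hf
      subst hf
      have hq : pvPrio (kw :: rest) e = 0 := by simp [pvPrio, hm]
      simp only [List.foldl_cons, pvStep, hq, if_pos hb]
      exact pvFold_fixed_zero _ _ _
    · have hm' : pvMatch kw e = false := by simpa using hm
      rw [hm'] at hf; simp at hf
      have hq : 0 < pvPrio (kw :: rest) e := by simp [pvPrio, hm']
      simp only [List.foldl_cons, pvStep]
      split
      · exact ih _ _ hq hf
      · exact ih _ _ hb hf

-- when no element matches the head keyword, the fold is the tail-keywords fold shifted by one
theorem pvFold_head_miss (kw : String) (rest : List String) :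
    ∀ (es : List String) (b : Nat) (o : Option String),
    (∀ e ∈ es, pvMatch kw e = false) →
    es.foldl (pvStep (kw :: rest)) (b + 1, o) =
      ((es.foldl (pvStep rest) (b, o)).1 + 1, (es.foldl (pvStep rest) (b, o)).2) := by
  intro es
  induction es with
  | nil => intro b o _; rfl
  | cons e es ih =>
    intro b o hall
    have hm : pvMatch kw e = false := hall e (List.mem_cons_self ..)
    have hq : pvPrio (kw :: rest) e = pvPrio rest e + 1 := by simp [pvPrio, hm]
    have hall' : ∀ x ∈ es, pvMatch kw x = false := fun x hx => hall x (List.mem_cons_of_mem _ hx)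
    simp only [List.foldl_cons, pvStep, hq]
    by_cases hlt : pvPrio rest e < b
    · rw [if_pos (by omega), if_pos hlt]
      exact ih _ _ hall'
    · rw [if_neg (by omega), if_neg hlt]
      exact ih _ _ hall'

-- main invariant: B's fold computes exactly A's nested-loop result (with its priority)
theorem pvFold_eq_loopA (kws : List String) (es : List String) :
    es.foldl (pvStep kws) (kws.length, none) =
      match pvLoopA kws es with
      | some e => (pvPrio kws e, some e)
      | none => (kws.length, none) := by
  induction kws with
  | nil => simp [pvLoopA, pvFold_fixed_zero]
  | cons kw rest ih =>
    cases hf : es.find? (fun e => pvMatch kw e) with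
    | some e0 =>
      have h0 := pvFold_head_match kw rest e0 es (rest.length + 1) none (Nat.succ_pos _) hf
      have hm : pvMatch kw e0 = true := by
        have := List.find?_some hf; simpa using this
      simp [pvLoopA, hf, List.length_cons, h0, pvPrio, hm]
    | none =>
      have hall : ∀ e ∈ es, pvMatch kw e = false := by
        intro e he
        have := List.find?_eq_none.mp hf e he
        simpa using this
      have h1 := pvFold_head_miss kw rest es rest.length none hall
      simp only [pvLoopA, hf, List.length_cons]
      rw [h1, ih]
      cases hl : pvLoopA rest es with
      | some e =>
        have hm : pvMatch kw e = false := hall e (pvLoopA_mem rest es e hl)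
        simp [pvPrio, hm]
      | none => simp

-- ===== VERDICT (by name: the statement is the Claim_ definition above) =====
theorem pick_default_expression_py_spec : Claim_equal_pick_default_expression_py := by
  intro es _
  unfold Spec_pick_default_expression_py
  unfold pick_default_expression_py pick_default_expression_py_alt
  by_cases hemp : es = []
  · simp [hemp]
  · rw [if_neg hemp, if_neg hemp]
    simp only [pvFold_eq_loopA]
    cases hl : pvLoopA ["think", "exp1", "shy", "note", "abb"] es with
    | some e =>
      have := pvLoopA_prio_lt _ es e hl
      simp only [List.length_cons, List.length_nil] at this ⊢
      rw [if_pos this]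
    | none => simp
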